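-- pv_equiv track=rewrite | github.com/zxcasd840510/Advanced-Encryption-Standard- | HW2.py | ip_pro
-- ===== SOURCE A (Python) =====
-- def ip_pro(a):   #input process
--     input_=[[None]*4 for i in range (4) ]
--     r=0
--     c=0
--     tem=0
--     for i in range(len(a)):
--         if a[i]!=" ":
--             if tem==0:
--                 input_[r][c]=a[i]
--                 tem=tem+1
--             else:
--                 input_[r][c]=input_[r][c]+a[i]
--                 tem=tem+1
--             if tem==2:
--                 r=r+1
--                 tem=0
--                 if r==4:
--                     c=c+1
--                     r=0
--     return input_
-- ===== SOURCE B (Python) =====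
-- def ip_pro(a):   #input process
--     flat = a.replace(" ", "")
--     chunks = [flat[i:i+2] for i in range(0, len(flat), 2)]
--     input_ = [[None]*4 for _ in range(4)]
--     for n, ch in enumerate(chunks):
--         input_[n % 4][n // 4] = ch
--     return input_
-- ===== Notes on version B (the rewrite author's own statement) =====
-- stated objective: simpler
-- what changed: Replaces A's char-by-char state machine (r/c/tem counters mutated per character) by separating parsing from placement: strip spaces, slice into 2-char chunks, place chunk n at input_[n%4][n//4] by index arithmetic.
import Mathlib
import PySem

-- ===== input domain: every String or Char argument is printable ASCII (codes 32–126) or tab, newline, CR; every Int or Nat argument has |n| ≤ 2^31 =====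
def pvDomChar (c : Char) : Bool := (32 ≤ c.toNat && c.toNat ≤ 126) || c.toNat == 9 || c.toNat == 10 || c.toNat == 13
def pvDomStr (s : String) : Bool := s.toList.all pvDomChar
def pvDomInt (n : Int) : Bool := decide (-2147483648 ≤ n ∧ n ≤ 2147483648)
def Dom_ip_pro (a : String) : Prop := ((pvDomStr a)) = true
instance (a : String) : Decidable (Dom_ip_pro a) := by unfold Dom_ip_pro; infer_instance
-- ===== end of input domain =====

-- B replaces A's char-by-char r/c/tem state machine by: strip spaces, slice into 2-char chunks,
-- place chunk n at row n%4, column n//4 (simpler decomposition; same O(n) cost).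


-- ===== PORT A =====
-- grid helpers shared by both ports (plain reads/writes of the 4x4 list of lists)
def gridGet (g : List (List (Option String))) (r c : Nat) : Option String :=
  (g.getD r []).getD c none

def gridSet (g : List (List (Option String))) (r c : Nat) (v : Option String) :
    List (List (Option String)) :=
  g.set r ((g.getD r []).set c v)

-- the loop body of A for a NON-space character (Python's `if a[i] != " "` branch);
-- state = (input_, r, c, tem).  `input_[r][c] + a[i]` reads the current cell, which inside
-- Pre_ is always a string; gridGet/getD "" is exact there.
def ipStep (st : List (List (Option String)) × Nat × Nat × Nat) (ch : Char) :
    List (List (Option String)) × Nat × Nat × Nat :=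
  let (g, r, c, tem) := st
  let g := if tem == 0 then gridSet g r c (some (String.ofList [ch]))
           else gridSet g r c (some ((gridGet g r c).getD "" ++ String.ofList [ch]))
  let tem := tem + 1
  if tem == 2 then
    if r + 1 == 4 then (g, 0, c + 1, 0) else (g, r + 1, c, 0)
  else (g, r, c, tem)

def ip_pro (a : String) : List (List (Option String)) :=
  let init := List.replicate 4 (List.replicate 4 (none : Option String))
  (a.toList.foldl (fun st ch => if ch ≠ ' ' then ipStep st ch else st)
    (init, 0, 0, 0)).1

-- ===== PORT B =====
-- consecutive 2-character chunks of a char list (last chunk may have length 1)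
def chunks2 : List Char → List String
  | [] => []
  | [x] => [String.ofList [x]]
  | x :: y :: rest => String.ofList [x, y] :: chunks2 rest

def ip_pro_alt (a : String) : List (List (Option String)) :=
  let flat := a.toList.filter (fun ch => ch ≠ ' ')
  ((chunks2 flat).zipIdx).foldl
    (fun g (p : String × Nat) => gridSet g (p.2 % 4) (p.2 / 4) (some p.1))
    (List.replicate 4 (List.replicate 4 none))

-- ===== PRECONDITION & SPEC =====
-- A raises IndexError (input_[0][4]) as soon as a 33rd non-space character arrives; Pre_
-- admits exactly the inputs on which A returns: at most 32 non-space characters.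
def Pre_ip_pro (a : String) : Prop :=
  (a.toList.filter (fun ch => ch ≠ ' ')).length ≤ 32
instance (a : String) : Decidable (Pre_ip_pro a) := by unfold Pre_ip_pro; infer_instance

def pvWitness_ip_pro : String := "3243f6a8 885a308d 313198a2 e0370734"

def Spec_ip_pro (a : String) (out : List (List (Option String))) : Prop := out = ip_pro_alt a
instance (a : String) (out : List (List (Option String))) : Decidable (Spec_ip_pro a out) := by unfold Spec_ip_pro; infer_instance

-- ===== CLAIM (what is proved, stated in full; the proofs are below) =====
def Claim_equal_ip_pro : Prop := ∀ (a : String), Dom_ip_pro a → Pre_ip_pro a → Spec_ip_pro a (ip_pro a)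

-- ===== LEMMAS AND PROOFS =====

-- shape invariant: a 4x4 grid
def GridShape (g : List (List (Option String))) : Prop :=
  g.length = 4 ∧ ∀ row ∈ g, row.length = 4

lemma gridShape_init : GridShape (List.replicate 4 (List.replicate 4 (none : Option String))) := by
  constructor
  · simp
  · intro row h
    simp_all [List.eq_of_mem_replicate h]

lemma gridShape_set (g : List (List (Option String))) (r c : Nat) (v : Option String)
    (h : GridShape g) : GridShape (gridSet g r c v) := by
  obtain ⟨h1, h2⟩ := h
  refine ⟨by simp [gridSet, h1], ?_⟩
  by_cases hr : r < g.length
  · intro row hrow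
    rcases List.mem_or_eq_of_mem_set hrow with h | h
    · exact h2 _ h
    · subst h
      simp [List.getD, List.getElem?_eq_getElem hr, h2 _ (List.getElem_mem hr)]
  · rw [gridSet, List.set_eq_of_length_le (Nat.le_of_not_lt hr)]
    exact h2

lemma gridGet_gridSet_self (g : List (List (Option String))) (r c : Nat) (v : Option String)
    (hg : GridShape g) (hr : r < 4) (hc : c < 4) :
    gridGet (gridSet g r c v) r c = v := by
  obtain ⟨h1, h2⟩ := hg
  have hrl : r < g.length := by omega
  have hcl : c < (g.getD r []).length := by
    rw [List.getD_eq_getElem _ _ hrl, h2 _ (List.getElem_mem hrl)]; exact hc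
  have hcl' : c < (g[r]'hrl).length := by
    rwa [List.getD_eq_getElem _ _ hrl] at hcl
  unfold gridGet gridSet
  rw [List.getD, List.getD, List.getElem?_set_self (by simpa using hrl), Option.getD_some,
    List.getD_eq_getElem _ _ hrl,
    List.getElem?_set_self (by simpa using hcl'), Option.getD_some]

lemma gridSet_gridSet_self (g : List (List (Option String))) (r c : Nat) (v w : Option String)
    (hg : GridShape g) (hr : r < 4) : gridSet (gridSet g r c v) r c w = gridSet g r c w := by
  obtain ⟨h1, h2⟩ := hg
  have hrl : r < g.length := by omega
  simp [gridSet, hrl, List.getElem_set_self, List.set_set]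

-- the two unfoldings of A's loop body used in the pair step
lemma ipStep_zero (g : List (List (Option String))) (r c : Nat) (x : Char) :
    ipStep (g, r, c, 0) x = (gridSet g r c (some (String.ofList [x])), r, c, 1) := by
  simp [ipStep]

lemma ipStep_one (g : List (List (Option String))) (r c : Nat) (y : Char) :
    ipStep (g, r, c, 1) y =
      (if r + 1 == 4 then
        (gridSet g r c (some ((gridGet g r c).getD "" ++ String.ofList [y])), 0, c + 1, 0)
      else
        (gridSet g r c (some ((gridGet g r c).getD "" ++ String.ofList [y])), r + 1, c, 0)) := by
  simp [ipStep]

-- the main invariant: running A's non-space body over L from state (g, n%4, n/4, 0) produces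
-- the same grid as placing the 2-char chunks of L starting at chunk index n
lemma main_inv (L : List Char) (n : Nat) (g : List (List (Option String)))
    (hg : GridShape g) (hb : 2 * n + L.length ≤ 32) :
    (L.foldl ipStep (g, n % 4, n / 4, 0)).1 =
      ((chunks2 L).zipIdx n).foldl
        (fun g (p : String × Nat) => gridSet g (p.2 % 4) (p.2 / 4) (some p.1)) g := by
  match L with
  | [] => simp [chunks2]
  | [x] =>
      simp [chunks2, List.foldl, ipStep]
  | x :: y :: rest =>
      have hn : n < 16 := by simp at hb; omega
      have hr : n % 4 < 4 := Nat.mod_lt _ (by norm_num)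
      have hc : n / 4 < 4 := by omega
      have hget : gridGet (gridSet g (n % 4) (n / 4) (some (String.ofList [x]))) (n % 4) (n / 4)
          = some (String.ofList [x]) := gridGet_gridSet_self _ _ _ _ hg hr hc
      have hset : gridSet (gridSet g (n % 4) (n / 4) (some (String.ofList [x]))) (n % 4) (n / 4)
          (some (String.ofList [x, y])) = gridSet g (n % 4) (n / 4) (some (String.ofList [x, y])) :=
        gridSet_gridSet_self _ _ _ _ _ hg hr
      have hg2 : GridShape (gridSet g (n % 4) (n / 4) (some (String.ofList [x, y]))) :=
        gridShape_set _ _ _ _ hg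
      have hb2 : 2 * (n + 1) + rest.length ≤ 32 := by simp at hb ⊢; omega
      have hstate : (if n % 4 + 1 == 4 then
            (gridSet g (n % 4) (n / 4) (some (String.ofList [x, y])), 0, n / 4 + 1, 0)
          else (gridSet g (n % 4) (n / 4) (some (String.ofList [x, y])), n % 4 + 1, n / 4, 0))
          = (gridSet g (n % 4) (n / 4) (some (String.ofList [x, y])), (n+1) % 4, (n+1) / 4, 0) := by
        by_cases h4 : n % 4 = 3
        · simp [show n % 4 + 1 = 4 by omega, show (n+1) % 4 = 0 by omega,
            show (n+1) / 4 = n / 4 + 1 by omega]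
        · simp [h4, show (n+1) % 4 = n % 4 + 1 by omega,
            show (n+1) / 4 = n / 4 by omega]
      have hxy : String.ofList [x] ++ String.ofList [y] = String.ofList [x, y] := by
        rw [← String.ofList_append]; simp
      calc ((x :: y :: rest).foldl ipStep (g, n % 4, n / 4, 0)).1
          = (rest.foldl ipStep
              (gridSet g (n % 4) (n / 4) (some (String.ofList [x, y])), (n+1) % 4, (n+1) / 4, 0)).1 := by
            simp only [List.foldl_cons, ipStep_zero, ipStep_one, hget, Option.getD_some,
              hxy, hset, hstate]
        _ = ((chunks2 rest).zipIdx (n+1)).foldl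
              (fun g (p : String × Nat) => gridSet g (p.2 % 4) (p.2 / 4) (some p.1))
              (gridSet g (n % 4) (n / 4) (some (String.ofList [x, y]))) :=
            main_inv rest (n+1) _ hg2 hb2
        _ = ((chunks2 (x :: y :: rest)).zipIdx n).foldl
              (fun g (p : String × Nat) => gridSet g (p.2 % 4) (p.2 / 4) (some p.1)) g := by
            simp [chunks2, List.zipIdx_cons]

-- A's loop skips spaces, so folding its body over the string equals folding the non-space
-- body over the filtered character list
lemma foldl_skip_spaces (l : List Char) (st : List (List (Option String)) × Nat × Nat × Nat) :
    l.foldl (fun st ch => if ch ≠ ' ' then ipStep st ch else st) st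
      = (l.filter (fun ch => ch ≠ ' ')).foldl ipStep st := by
  induction l generalizing st with
  | nil => rfl
  | cons ch tl ih =>
      by_cases h : ch = ' '
      · simpa [h] using ih st
      · simpa [h] using ih (ipStep st ch)

-- ===== VERDICT (by name: the statement is the Claim_ definition above) =====
theorem ip_pro_spec : Claim_equal_ip_pro := by
  intro a _ hpre
  unfold Spec_ip_pro ip_pro ip_pro_alt
  dsimp only
  rw [foldl_skip_spaces]
  exact main_inv _ 0 _ gridShape_init (by simpa [Pre_ip_pro] using hpre)
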